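-- pv_equiv track=rewrite | github.com/danguan/aoc2021 | day14/solution2.py | _get_common_diff
-- ===== SOURCE A (Python) =====
-- from collections import Counter, defaultdict
-- from typing import DefaultDict
--
-- def _get_common_diff(
--     template_counts: DefaultDict[str, int], original_template: str
-- ) -> int:
--     """Finds <most common char count> - <least common char count>.
--
--     Note that each pair in template counts will double-count any chars
--     besides the first and last chars.
--
--     Example:
--         original_template = "ABCDE"
--         template_counts = {
--             "AB": 1,
--             "BC": 1,
--             "CD": 1,
--             "DE": 1,
--         }
--         assert _get_common_diff(template_counts, original_template) == 0
--
--     In above example, B, C, and D will have frequencies of 2 if counting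
--     all letters in all pairs, while A and E will only have frequencies of
--     1. To fix this, we add 1 to the frequencies of the first and last
--     chars in original_template, and then divide all frequencies by 2.
--
--     Args:
--         template_counts: Count of pairs of characters in current template
--             iteration.
--         original_template: Template provided in original puzzle input.
--
--     Returns:
--         Difference between count of most common character and count of
--         least common character.
--     """
--     char_counts = defaultdict(int)
--
--     for pair in template_counts:
--         occurrence = template_counts[pair]
--         char_counts[pair[0]] += occurrence
--         char_counts[pair[1]] += occurrence
--
--     char_counts[original_template[0]] += 1
--     char_counts[original_template[-1]] += 1
--
--     counts = Counter(char_counts).most_common()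
--
--     return counts[0][1] // 2 - counts[-1][1] // 2
-- ===== SOURCE B (Python) =====
-- def _get_common_diff(template_counts, original_template):
--     """Same result as A: <most common char count>//2 - <least common char count>//2,
--     computed with a single extremal scan instead of Counter.most_common()'s sort."""
--     char_counts = {}
--     for pair, occ in template_counts.items():
--         char_counts[pair[0]] = char_counts.get(pair[0], 0) + occ
--         char_counts[pair[1]] = char_counts.get(pair[1], 0) + occ
--     first = original_template[0]
--     last = original_template[-1]
--     char_counts[first] = char_counts.get(first, 0) + 1
--     char_counts[last] = char_counts.get(last, 0) + 1
--     values = iter(char_counts.values())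
--     hi = lo = next(values)
--     for v in values:
--         if v > hi:
--             hi = v
--         if v < lo:
--             lo = v
--     return hi // 2 - lo // 2
-- ===== Notes on version B (the rewrite author's own statement) =====
-- stated objective: simpler
-- what changed: Keeps the pair-accumulation pass but replaces building a Counter and sorting all items with most_common() (then indexing first/last) by a single scan over the count values that tracks the running max and min.
import Mathlib
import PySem

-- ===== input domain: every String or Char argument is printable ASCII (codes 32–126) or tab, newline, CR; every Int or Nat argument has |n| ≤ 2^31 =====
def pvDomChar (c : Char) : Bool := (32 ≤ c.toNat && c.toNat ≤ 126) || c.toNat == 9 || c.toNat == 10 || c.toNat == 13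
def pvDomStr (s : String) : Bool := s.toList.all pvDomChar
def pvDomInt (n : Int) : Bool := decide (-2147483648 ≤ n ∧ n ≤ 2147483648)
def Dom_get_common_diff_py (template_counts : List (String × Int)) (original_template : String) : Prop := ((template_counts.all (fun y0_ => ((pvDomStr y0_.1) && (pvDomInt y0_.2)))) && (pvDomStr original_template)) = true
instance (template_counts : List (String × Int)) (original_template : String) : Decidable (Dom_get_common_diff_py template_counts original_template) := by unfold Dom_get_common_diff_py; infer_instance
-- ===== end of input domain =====

-- B replaces Counter(...).most_common() (sort, then first/last item) by a single
-- running max/min scan over the count values; the accumulation pass is kept.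

-- ===== PORT A =====
-- the dict parameter arrives as an association list; building the PySem.Dict is the
-- marshalling of Python's dict (duplicate keys overwrite, first position kept)
def get_common_diff_py (template_counts : List (String × Int)) (original_template : String) : Int :=
  let tcd : PySem.Dict String Int := PySem.Dict.ofList template_counts
  -- char_counts = defaultdict(int); for pair in template_counts: ...
  let char_counts : PySem.Dict Char Int :=
    tcd.items.foldl (fun cc pair =>
      let occurrence : Int := ((tcd.get? pair.1).getD 0)   -- template_counts[pair]
      match PySem.Str.pyGet? pair.1 0, PySem.Str.pyGet? pair.1 1 with
      | some c0, some c1 =>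
          (cc.modify c0 0 (· + occurrence)).modify c1 0 (· + occurrence)
      | _, _ => cc  -- pair[0]/pair[1] would raise IndexError: outside Pre_
      ) PySem.Dict.empty
  -- char_counts[original_template[0]] += 1
  let char_counts :=
    match PySem.Str.pyGet? original_template 0 with
    | some c => char_counts.modify c 0 (· + 1)
    | none => char_counts  -- IndexError: outside Pre_
  -- char_counts[original_template[-1]] += 1
  let char_counts :=
    match PySem.Str.pyGet? original_template (-1) with
    | some c => char_counts.modify c 0 (· + 1)
    | none => char_counts  -- IndexError: outside Pre_
  -- counts = Counter(char_counts).most_common()  (sorted by count, descending, stable)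
  let counts := PySem.List.sorted char_counts.items (fun p => p.2) true
  match PySem.List.pyGet? counts 0, PySem.List.pyGet? counts (-1) with
  | some f, some lst => PySem.Int.floordiv f.2 2 - PySem.Int.floordiv lst.2 2
  | _, _ => 0  -- counts[0] would raise IndexError: outside Pre_

-- ===== PORT B =====
-- char_counts[c] = char_counts.get(c, 0) + k
def pvBump (cc : PySem.Dict Char Int) (c : Char) (k : Int) : PySem.Dict Char Int :=
  cc.insert c (cc.getD c 0 + k)

def get_common_diff_py_alt (template_counts : List (String × Int)) (original_template : String) : Int :=
  let tcd : PySem.Dict String Int := PySem.Dict.ofList template_counts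
  -- for pair, occ in template_counts.items(): bump pair[0], bump pair[1]
  let char_counts : PySem.Dict Char Int :=
    tcd.items.foldl (fun cc pv =>
      match PySem.Str.pyGet? pv.1 0 with
      | none => cc  -- IndexError: outside Pre_
      | some c0 =>
        match PySem.Str.pyGet? pv.1 1 with
        | none => cc  -- IndexError: outside Pre_
        | some c1 => pvBump (pvBump cc c0 pv.2) c1 pv.2) PySem.Dict.empty
  -- first = original_template[0]; last = original_template[-1]; bump both
  let char_counts :=
    match PySem.Str.pyGet? original_template 0 with
    | none => char_counts  -- IndexError: outside Pre_
    | some first =>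
      match PySem.Str.pyGet? original_template (-1) with
      | none => char_counts  -- IndexError: outside Pre_
      | some last => pvBump (pvBump char_counts first 1) last 1
  -- hi = lo = next(values); one scan keeping the running max and min
  match char_counts.values with
  | [] => 0  -- next() would raise StopIteration; unreachable under Pre_
  | v :: vs =>
    let hl := vs.foldl
      (fun hl v => (if v > hl.1 then v else hl.1, if v < hl.2 then v else hl.2)) (v, v)
    PySem.Int.floordiv hl.1 2 - PySem.Int.floordiv hl.2 2

-- ===== PRECONDITION & SPEC =====
-- Pre_ excludes exactly the inputs where the Python raises IndexError: an empty
-- original_template (original_template[0]) or a key of length < 2 (pair[1]).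
def Pre_get_common_diff_py (template_counts : List (String × Int)) (original_template : String) : Prop :=
  1 ≤ original_template.length ∧ ∀ p ∈ template_counts, 2 ≤ p.1.length
instance (template_counts : List (String × Int)) (original_template : String) : Decidable (Pre_get_common_diff_py template_counts original_template) := by unfold Pre_get_common_diff_py; infer_instance

def pvWitness_get_common_diff_py : (List (String × Int)) × String := ([("AB", 1), ("BC", 2)], "ABC")

def Spec_get_common_diff_py (template_counts : List (String × Int)) (original_template : String) (out : Int) : Prop := out = get_common_diff_py_alt template_counts original_template
instance (template_counts : List (String × Int)) (original_template : String) (out : Int) : Decidable (Spec_get_common_diff_py template_counts original_template out) := by unfold Spec_get_common_diff_py; infer_instance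

-- ===== CLAIM (what is proved, stated in full; the proofs are below) =====
def Claim_equal_get_common_diff_py : Prop := ∀ (template_counts : List (String × Int)) (original_template : String), Dom_get_common_diff_py template_counts original_template → Pre_get_common_diff_py template_counts original_template → Spec_get_common_diff_py template_counts original_template (get_common_diff_py template_counts original_template)

-- ===== LEMMAS AND PROOFS =====

-- the (hi, lo) pair scan is the pair of running max and running min
theorem pvFoldPair (vs : List Int) (a b : Int) :
    vs.foldl (fun hl v => (if v > hl.1 then v else hl.1, if v < hl.2 then v else hl.2)) (a, b)
      = (vs.foldl max a, vs.foldl min b) := by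
  induction vs generalizing a b with
  | nil => rfl
  | cons v t ih =>
      simp only [List.foldl_cons, ih]
      congr 2
      · rw [max_def]; split_ifs <;> omega
      · rw [min_def]; split_ifs <;> omega

-- in a list pairwise-sorted by descending value, the last element has minimal value
theorem pvGetLastMin : ∀ (l : List (Char × Int)), l.Pairwise (fun a b => b.2 ≤ a.2) →
    ∀ (hne : l ≠ []), ∀ y ∈ l, (l.getLast hne).2 ≤ y.2
  | [], h, hne => by simp at hne
  | [a], _, _ => by simp
  | a :: b :: u, h, _ => by
      intro y hy
      rcases List.pairwise_cons.mp h with ⟨ha, ht⟩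
      have hrec := pvGetLastMin (b :: u) ht (by simp)
      rw [List.getLast_cons (by simp)]
      rcases List.mem_cons.mp hy with rfl | hyt
      · exact le_trans (hrec _ (List.getLast_mem (by simp))) (ha _ (List.getLast_mem (by simp)))
      · exact hrec _ hyt

-- pvBump is Python's d[c] = d.get(c, 0) + k, i.e. a modify with default 0
theorem pvBump_eq_modify (cc : PySem.Dict Char Int) (c : Char) (k : Int) :
    pvBump cc c k = cc.modify c 0 (· + k) := rfl

-- dict.values() is the second projection of the items
theorem pvValues_eq (d : PySem.Dict Char Int) : d.values = d.items.map (fun p => p.2) := rfl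

-- sorted-descending, then take first/last value ≡ running max/min over the values
theorem pvTail (l : List (Char × Int)) :
    (match PySem.List.pyGet? (PySem.List.sorted l (fun p => p.2) true) 0,
           PySem.List.pyGet? (PySem.List.sorted l (fun p => p.2) true) (-1) with
     | some f, some lst => PySem.Int.floordiv f.2 2 - PySem.Int.floordiv lst.2 2
     | _, _ => (0 : Int))
    = (match l.map (fun p => p.2) with
       | [] => (0 : Int)
       | v :: vs =>
         PySem.Int.floordiv (vs.foldl
           (fun hl v => (if v > hl.1 then v else hl.1, if v < hl.2 then v else hl.2)) (v, v)).1 2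
         - PySem.Int.floordiv (vs.foldl
           (fun hl v => (if v > hl.1 then v else hl.1, if v < hl.2 then v else hl.2)) (v, v)).2 2) := by
  rcases l with _ | ⟨p, rest⟩
  · rfl
  · have hsne : PySem.List.sorted (p :: rest) (fun p => p.2) true ≠ [] := by
      rw [Ne, PySem.List.sorted_eq_nil_iff]; simp
    obtain ⟨m, t, hmt⟩ := List.exists_cons_of_ne_nil hsne
    have hperm := PySem.List.sorted_perm (p :: rest) (fun p => p.2) true
    have h0 : PySem.List.pyGet? (PySem.List.sorted (p :: rest) (fun p => p.2) true) 0 = some m := by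
      rw [hmt]; exact PySem.List.pyGet?_zero_cons m t
    have hlastmem : (m :: t).getLast (by simp) ∈ p :: rest := by
      refine hperm.mem_iff.mp ?_
      rw [hmt]; exact List.getLast_mem (by simp)
    have hneg : PySem.List.pyGet? (PySem.List.sorted (p :: rest) (fun p => p.2) true) (-1)
        = some ((m :: t).getLast (by simp)) := by
      rw [PySem.List.pyGet?_neg_one, hmt, List.getLast?_eq_some_getLast]
    rw [h0, hneg]
    simp only [List.map_cons, pvFoldPair]
    have hmax := PySem.List.max?_id_cons p.2 (rest.map (fun p => p.2))
    have hmin := PySem.List.min?_id_cons p.2 (rest.map (fun p => p.2))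
    have hmaxmem := PySem.List.max?_mem hmax
    have hminmem := PySem.List.min?_mem hmin
    have hmaxmax := PySem.List.max?_isMax hmax
    have hminmin := PySem.List.min?_isMin hmin
    have hmem_iff : ∀ z : Int, z ∈ p.2 :: List.map (fun p => p.2) rest ↔
        ∃ y ∈ p :: rest, y.2 = z := by
      intro z; rw [← List.map_cons]; simp [List.mem_map]; tauto
    have hdesc := PySem.List.key_head_sorted_rev_ge (p :: rest) (fun p => p.2) hmt
    have hm : m ∈ p :: rest := by
      refine hperm.mem_iff.mp ?_; rw [hmt]; exact List.mem_cons_self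
    have hhead : m.2 = List.foldl max p.2 (List.map (fun p => p.2) rest) := by
      apply le_antisymm
      · exact hmaxmax m.2 ((hmem_iff m.2).mpr ⟨m, hm, rfl⟩)
      · obtain ⟨y, hy, hyz⟩ := (hmem_iff _).mp hmaxmem
        exact hyz ▸ hdesc y hy
    have hpw : (m :: t).Pairwise (fun a b => b.2 ≤ a.2) := by
      have := PySem.List.sorted_pairwise_rev (p :: rest) (fun p => p.2)
      rwa [hmt] at this
    have hlastmin := pvGetLastMin (m :: t) hpw (by simp)
    have hlast : ((m :: t).getLast (by simp)).2
        = List.foldl min p.2 (List.map (fun p => p.2) rest) := by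
      apply le_antisymm
      · obtain ⟨y, hy, hyz⟩ := (hmem_iff _).mp hminmem
        have hym : y ∈ m :: t := by rw [← hmt]; exact hperm.mem_iff.mpr hy
        exact hyz ▸ hlastmin y hym
      · exact hminmin _ ((hmem_iff _).mpr ⟨_, hlastmem, rfl⟩)
    rw [hhead, hlast]

theorem pvPortsEq (template_counts : List (String × Int)) (original_template : String) :
    get_common_diff_py template_counts original_template
      = get_common_diff_py_alt template_counts original_template := by
  unfold get_common_diff_py get_common_diff_py_alt
  have hnd := PySem.Dict.nodup_keys_ofList (κ := String) (ν := Int) template_counts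
  -- the two accumulation folds build the same dict: template_counts[pair] = the
  -- iterated value, and defaultdict `+=` = get(…,0)+… followed by assignment
  have hfold :
      (PySem.Dict.ofList template_counts).items.foldl (fun cc pair =>
        let occurrence : Int := ((PySem.Dict.ofList template_counts).get? pair.1).getD 0
        match PySem.Str.pyGet? pair.1 0, PySem.Str.pyGet? pair.1 1 with
        | some c0, some c1 =>
            (cc.modify c0 0 (· + occurrence)).modify c1 0 (· + occurrence)
        | _, _ => cc) PySem.Dict.empty
      = (PySem.Dict.ofList template_counts).items.foldl (fun cc pv =>
        match PySem.Str.pyGet? pv.1 0 with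
        | none => cc
        | some c0 =>
          match PySem.Str.pyGet? pv.1 1 with
          | none => cc
          | some c1 => pvBump (pvBump cc c0 pv.2) c1 pv.2) PySem.Dict.empty := by
    apply PySem.List.foldl_congr_mem
    intro acc x hx
    obtain ⟨k, v⟩ := x
    rw [PySem.Dict.get?_of_mem_items _ hx hnd]
    cases PySem.Str.pyGet? k 0 <;> cases PySem.Str.pyGet? k 1 <;> rfl
  simp only [hfold]
  generalize (PySem.Dict.ofList template_counts).items.foldl (fun cc pv =>
      match PySem.Str.pyGet? pv.1 0 with
      | none => cc
      | some c0 =>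
        match PySem.Str.pyGet? pv.1 1 with
        | none => cc
        | some c1 => pvBump (pvBump cc c0 pv.2) c1 pv.2) PySem.Dict.empty = cc
  -- the first/last template character adjustments
  simp only [PySem.Str.pyGet?_eq, PySem.Chars.pyGet?_eq_listPyGet?]
  cases hot : original_template.toList with
  | nil =>
      simp only [show PySem.List.pyGet? ([] : List Char) 0 = none from rfl,
        show PySem.List.pyGet? ([] : List Char) (-1) = none from rfl, pvValues_eq]
      exact pvTail cc.items
  | cons c cs =>
      have h2 : PySem.List.pyGet? (c :: cs) (-1) = some ((c :: cs).getLast (by simp)) := by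
        rw [PySem.List.pyGet?_neg_one, List.getLast?_eq_some_getLast]
      simp only [PySem.List.pyGet?_zero_cons, h2, pvBump_eq_modify, pvValues_eq]
      exact pvTail _
-- ===== VERDICT (by name: the statement is the Claim_ definition above) =====
theorem get_common_diff_py_spec : Claim_equal_get_common_diff_py := by
  intro tc ot _ _
  unfold Spec_get_common_diff_py
  exact pvPortsEq tc ot
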